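-- pv_equiv track=rewrite | github.com/JohnBatmanMySlinky/Advent-of-Code | 2019/16/solution16.py | FFT2
-- ===== SOURCE A (Python) =====
-- from copy import deepcopy
--
-- def FFT2(signal, phases):
--     to_process = signal.copy()
--     for z in range(phases):
--         full = sum(to_process)
--         out = []
--         for i in range(len(to_process)):
--             out += [((full % 10) + 10) % 10]
--             full -= to_process[i]
--         to_process = deepcopy(out)
--     return to_process
-- ===== SOURCE B (Python) =====
-- # Closed form over phases: after p phases, out[i] = (sum_d C(p-1+d, d) * signal[i+d]) % 10,
-- # so B computes binomial weights once and takes one weighted sum per position -- no phase loop.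
-- def dot(cs, xs):
--     s = 0
--     for c, x in zip(cs, xs):
--         s += c * x
--     return s
--
-- def FFT2(sig, phases):
--     if phases <= 0:
--         return list(sig)
--     n = len(sig)
--     cs = [1]
--     c = 1
--     for d in range(1, n):
--         c = c * (phases - 1 + d) // d
--         cs.append(c)
--     return [dot(cs, sig[i:]) % 10 for i in range(n)]
-- ===== Notes on version B (the rewrite author's own statement) =====
-- stated objective: alternative
-- what changed: B replaces the phase-by-phase iteration entirely with the closed form out[i] = (sum_d C(phases-1+d, d) * signal[i+d]) % 10: the binomial weights of the p-fold suffix-sum operator are computed once by a multiplicative recurrence and each output is one weighted sum over the suffix, so there is no loop over phases at all.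
import Mathlib
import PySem

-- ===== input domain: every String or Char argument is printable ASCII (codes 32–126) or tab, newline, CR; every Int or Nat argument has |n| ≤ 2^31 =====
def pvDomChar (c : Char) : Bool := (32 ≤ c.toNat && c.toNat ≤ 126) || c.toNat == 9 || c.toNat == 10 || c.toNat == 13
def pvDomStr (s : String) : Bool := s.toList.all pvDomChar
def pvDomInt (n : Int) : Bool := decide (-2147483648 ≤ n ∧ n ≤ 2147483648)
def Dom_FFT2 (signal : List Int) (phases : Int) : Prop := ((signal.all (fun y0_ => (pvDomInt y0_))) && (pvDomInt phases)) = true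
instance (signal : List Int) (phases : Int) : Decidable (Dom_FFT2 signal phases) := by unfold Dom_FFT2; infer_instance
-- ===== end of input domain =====

-- B replaces A's phase-by-phase iteration with the closed form
-- out[i] = (Σ_d C(phases-1+d, d) · signal[i+d]) % 10 (binomial weights of the
-- p-fold suffix-sum operator, computed once by a multiplicative recurrence).

-- ===== PORT A =====
def FFT2 (signal : List Int) (phases : Int) : List Int :=
  (PySem.List.pyRange 0 phases 1).foldl
    (fun to_process _ =>
      let full := to_process.sum
      ((PySem.List.pyRange 0 (to_process.length : Int) 1).foldl
        (fun (st : List Int × Int) i =>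
          (st.1 ++ [PySem.Int.mod (PySem.Int.mod st.2 10 + 10) 10],
           st.2 - PySem.List.pyGetD to_process i 0))
        ([], full)).1)
    signal

-- ===== PORT B =====
-- helper dot(cs, xs): running sum over zip(cs, xs)
def pvDot (cs xs : List Int) : Int :=
  (cs.zip xs).foldl (fun s p => s + p.1 * p.2) 0

def FFT2_alt (signal : List Int) (phases : Int) : List Int :=
  if phases ≤ 0 then signal
  else
    let n := signal.length
    let cs := ((PySem.List.pyRange 1 (n : Int) 1).foldl
      (fun (st : List Int × Int) d =>
        let c := PySem.Int.floordiv (st.2 * (phases - 1 + d)) d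
        (st.1 ++ [c], c))
      ([1], 1)).1
    (PySem.List.pyRange 0 (n : Int) 1).map
      (fun i => PySem.Int.mod (pvDot cs (PySem.List.slice signal (some i) none)) 10)

-- ===== PRECONDITION & SPEC =====
def Spec_FFT2 (signal : List Int) (phases : Int) (out : List Int) : Prop := out = FFT2_alt signal phases
instance (signal : List Int) (phases : Int) (out : List Int) : Decidable (Spec_FFT2 signal phases out) := by unfold Spec_FFT2; infer_instance

-- ===== CLAIM (what is proved, stated in full; the proofs are below) =====
def Claim_equal_FFT2 : Prop := ∀ (signal : List Int) (phases : Int), Dom_FFT2 signal phases → Spec_FFT2 signal phases (FFT2 signal phases)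

-- ===== LEMMAS AND PROOFS =====

-- ---- A-side characterisation: one phase is the suffix-sum-mod-10 map `pvPhase` ----

-- A's inner loop: mods of the running total, drained front-to-back
def pvGA : List Int → Int → List Int
  | [], _ => []
  | x :: xs, s => PySem.Int.mod (PySem.Int.mod s 10 + 10) 10 :: pvGA xs (s - x)

-- one phase, structurally: element i is (suffix sum from i) % 10
def pvPhase : List Int → List Int
  | [] => []
  | x :: xs => PySem.Int.mod (x + xs.sum) 10 :: pvPhase xs

theorem pvMod2_eq (s : Int) :
    PySem.Int.mod (PySem.Int.mod s 10 + 10) 10 = PySem.Int.mod s 10 := by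
  simp only [PySem.Int.mod_eq_emod_of_pos (by norm_num : (0:Int) < 10)]
  omega

theorem pvFoldlA_eq_gA (tp : List Int) (s : Int) (acc : List Int) :
    (tp.foldl
      (fun (st : List Int × Int) x =>
        (st.1 ++ [PySem.Int.mod (PySem.Int.mod st.2 10 + 10) 10], st.2 - x))
      (acc, s)).1 = acc ++ pvGA tp s := by
  induction tp generalizing s acc with
  | nil => simp [pvGA]
  | cons x xs ih =>
    simp only [List.foldl_cons]
    rw [ih]
    simp [pvGA, List.append_assoc]

theorem pvPhaseA_eq (cur : List Int) :
    ((PySem.List.pyRange 0 (cur.length : Int) 1).foldl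
      (fun (st : List Int × Int) i =>
        (st.1 ++ [PySem.Int.mod (PySem.Int.mod st.2 10 + 10) 10],
         st.2 - PySem.List.pyGetD cur i 0))
      ([], cur.sum)).1 = pvGA cur cur.sum := by
  rw [PySem.List.foldl_pyRange_zero_pyGetD' cur 0
      (fun (st : List Int × Int) x =>
        (st.1 ++ [PySem.Int.mod (PySem.Int.mod st.2 10 + 10) 10], st.2 - x))
      ([], cur.sum)]
  simpa using pvFoldlA_eq_gA cur cur.sum []

theorem pvGA_sum (xs : List Int) : pvGA xs xs.sum = pvPhase xs := by
  induction xs with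
  | nil => rfl
  | cons x xs ih =>
    show pvGA (x :: xs) (x + xs.sum) = _
    rw [pvGA, pvMod2_eq, pvPhase]
    have : x + xs.sum - x = xs.sum := by ring
    rw [this, ih]

theorem pvFoldl_iterate {A B : Type} (g : A -> A) (l : List B) (init : A) :
    l.foldl (fun s _ => g s) init = g^[l.length] init := by
  induction l generalizing init with
  | nil => rfl
  | cons b l ih => simp [List.foldl_cons, ih, Function.iterate_succ_apply]

theorem pvFFT2_iterate (signal : List Int) (p : Nat) :
    FFT2 signal (p : Int) = pvPhase^[p] signal := by
  unfold FFT2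
  rw [pvFoldl_iterate (fun to_process =>
    ((PySem.List.pyRange 0 (to_process.length : Int) 1).foldl
      (fun (st : List Int × Int) i =>
        (st.1 ++ [PySem.Int.mod (PySem.Int.mod st.2 10 + 10) 10],
         st.2 - PySem.List.pyGetD to_process i 0))
      ([], to_process.sum)).1)]
  rw [PySem.List.length_pyRange_one]
  have hlen : (((p : Int) - 0)).toNat = p := by omega
  rw [hlen]
  have hfun : (fun (to_process : List Int) =>
      ((PySem.List.pyRange 0 (to_process.length : Int) 1).foldl
        (fun (st : List Int × Int) i =>
          (st.1 ++ [PySem.Int.mod (PySem.Int.mod st.2 10 + 10) 10],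
           st.2 - PySem.List.pyGetD to_process i 0))
        ([], to_process.sum)).1) = pvPhase := by
    funext c
    exact (pvPhaseA_eq c).trans (pvGA_sum c)
  rw [hfun]

-- ---- binomial weights and the closed form ----

-- cst k d m = [C(k+d,d), C(k+d+1,d+1), …]  (m terms)
def pvCst (k : Nat) : Nat → Nat → List Int
  | _, 0 => []
  | d, m + 1 => ((k + d).choose d : Int) :: pvCst k (d + 1) m

-- weighted suffix sum with coefficients C(k+d,d)
def pvW (k : Nat) : Nat → List Int → Int
  | _, [] => 0
  | d, x :: xs => ((k + d).choose d : Int) * x + pvW k (d + 1) xs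

-- the closed form: element i is (pvW k 0 (drop i xs)) % 10
def pvBform (k : Nat) : List Int → List Int
  | [] => []
  | x :: xs => PySem.Int.mod (pvW k 0 (x :: xs)) 10 :: pvBform k xs

theorem pvW_zero (d : Nat) (xs : List Int) : pvW 0 d xs = xs.sum := by
  induction xs generalizing d with
  | nil => rfl
  | cons x xs ih => simp [pvW, ih]

theorem pvPhase_eq_bform_zero (xs : List Int) : pvPhase xs = pvBform 0 xs := by
  induction xs with
  | nil => rfl
  | cons x xs ih => simp [pvPhase, pvBform, pvW, pvW_zero, ih]

theorem pvW_pascal (p : Nat) (xs : List Int) (d : Nat) :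
    pvW p (d + 1) xs + pvW (p + 1) d xs = pvW (p + 1) (d + 1) xs := by
  induction xs generalizing d with
  | nil => simp [pvW]
  | cons x xs ih =>
    simp only [pvW]
    rw [<- ih (d + 1)]
    have hch : (p + 1 + (d + 1)).choose (d + 1)
        = (p + (d + 1)).choose (d + 1) + (p + 1 + d).choose d := by
      have e1 : p + 1 + (d + 1) = (p + d + 1) + 1 := by omega
      have e2 : p + (d + 1) = p + d + 1 := by omega
      have e3 : p + 1 + d = p + d + 1 := by omega
      rw [e1, e2, e3, Nat.choose_succ_succ (p + d + 1) d]
      simp only [Nat.succ_eq_add_one]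
      omega
    have hchI : ((p + 1 + (d + 1)).choose (d + 1) : Int)
        = ((p + (d + 1)).choose (d + 1) : Int) + ((p + 1 + d).choose d : Int) := by
      exact_mod_cast congrArg (fun n : Nat => (n : Int)) hch
    rw [hchI]; ring

-- sum over all suffixes of pvW p 0 equals pvW (p+1) 0
theorem pvSsum (p : Nat) (xs : List Int) :
    (match xs with | [] => (0:Int) | x :: t => pvW p 0 (x :: t) + pvW (p + 1) 0 t)
      = pvW (p + 1) 0 xs := by
  cases xs with
  | nil => rfl
  | cons x t =>
    simp only [pvW]
    rw [← pvW_pascal p t 0]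
    simp [Nat.choose_zero_right]; ring

-- sum of pvBform p is congruent mod 10 to pvW (p+1) 0
theorem pvBform_sum_mod (p : Nat) (xs : List Int) :
    (pvBform p xs).sum % 10 = pvW (p + 1) 0 xs % 10 := by
  induction xs with
  | nil => rfl
  | cons x xs ih =>
    have key := pvSsum p (x :: xs)
    simp only at key
    simp only [pvBform, List.sum_cons,
      PySem.Int.mod_eq_emod_of_pos (by norm_num : (0:Int) < 10)]
    rw [<- key]
    omega

theorem pvPhase_bform (p : Nat) (xs : List Int) :
    pvPhase (pvBform p xs) = pvBform (p + 1) xs := by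
  induction xs with
  | nil => rfl
  | cons x xs ih =>
    show PySem.Int.mod (PySem.Int.mod (pvW p 0 (x :: xs)) 10 + (pvBform p xs).sum) 10
          :: pvPhase (pvBform p xs)
        = PySem.Int.mod (pvW (p + 1) 0 (x :: xs)) 10 :: pvBform (p + 1) xs
    rw [List.cons.injEq]
    refine ⟨?_, ih⟩
    have hs := pvBform_sum_mod p xs
    have key := pvSsum p (x :: xs)
    simp only at key
    simp only [PySem.Int.mod_eq_emod_of_pos (by norm_num : (0:Int) < 10)]
    omega

theorem pvIterate_bform (p : Nat) (xs : List Int) :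
    pvPhase^[p + 1] xs = pvBform p xs := by
  induction p with
  | zero => simpa [Function.iterate_one] using pvPhase_eq_bform_zero xs
  | succ k ih =>
    rw [Function.iterate_succ_apply', ih, pvPhase_bform]

-- ---- B-side characterisation ----

theorem pvFoldl_shift (l : List (Int × Int)) (a : Int) :
    l.foldl (fun s p => s + p.1 * p.2) a = a + l.foldl (fun s p => s + p.1 * p.2) 0 := by
  induction l generalizing a with
  | nil => simp
  | cons q l ih =>
    simp only [List.foldl_cons]
    rw [ih, ih (0 + q.1 * q.2)]
    ring

theorem pvDot_cons (c x : Int) (cs xs : List Int) :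
    pvDot (c :: cs) (x :: xs) = c * x + pvDot cs xs := by
  unfold pvDot
  simp only [List.zip_cons_cons, List.foldl_cons]
  rw [pvFoldl_shift]
  ring

theorem pvDot_cst (k : Nat) (d m : Nat) (ys : List Int) (h : ys.length ≤ m) :
    pvDot (pvCst k d m) ys = pvW k d ys := by
  induction ys generalizing d m with
  | nil => cases m <;> rfl
  | cons y ys ih =>
    cases m with
    | zero => simp at h
    | succ m' =>
      rw [pvCst, pvDot_cons, pvW, ih (d + 1) m' (by simpa using h)]

theorem pvCst_snoc (k : Nat) (d m : Nat) :
    pvCst k d (m + 1) = pvCst k d m ++ [((k + d + m).choose (d + m) : Int)] := by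
  induction m generalizing d with
  | zero => simp [pvCst]
  | succ m' ih =>
    rw [pvCst, ih (d + 1)]
    rw [pvCst]
    simp only [List.cons_append]
    have e1 : k + d + (m' + 1) = k + (d + 1) + m' := by omega
    have e2 : d + (m' + 1) = d + 1 + m' := by omega
    rw [e1, e2]

-- the coefficient loop builds pvCst (p-1) 0 n
theorem pvCsLoop (k n : Nat) (phases : Int) (hph : phases = (k : Int) + 1)
    (hn : 1 ≤ n) :
    ((PySem.List.pyRange 1 (n : Int) 1).foldl
      (fun (st : List Int × Int) d =>
        (st.1 ++ [PySem.Int.floordiv (st.2 * (phases - 1 + d)) d],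
         PySem.Int.floordiv (st.2 * (phases - 1 + d)) d))
      ([1], 1)) = (pvCst k 0 n, ((k + (n - 1)).choose (n - 1) : Int)) := by
  induction n with
  | zero => omega
  | succ m ih =>
    cases Nat.eq_or_lt_of_le hn with
    | inl h1 =>
      -- n = 1
      have : m = 0 := by omega
      subst this
      rw [PySem.List.pyRange_one_eq_nil (by norm_num)]
      simp [pvCst]
    | inr h2 =>
      have hm : 1 ≤ m := by omega
      have hsplit : PySem.List.pyRange 1 ((m + 1 : Nat) : Int) 1
          = PySem.List.pyRange 1 (m : Int) 1 ++ [(m : Int)] := by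
        have : ((m + 1 : Nat) : Int) = (m : Int) + 1 := by push_cast; ring
        rw [this, PySem.List.pyRange_one_succ_right (by exact_mod_cast hm)]
      rw [hsplit, List.foldl_append, ih hm]
      simp only [List.foldl_cons, List.foldl_nil]
      have hstep : PySem.Int.floordiv
          (((k + (m - 1)).choose (m - 1) : Int) * (phases - 1 + (m : Int))) (m : Int)
          = ((k + m).choose m : Int) := by
        have hm1 : (m - 1) + 1 = m := by omega
        have harg : phases - 1 + (m : Int) = ((k + m : Nat) : Int) := by
          rw [hph]; push_cast; ring
        rw [harg]
        have hmul : ((k + (m - 1)).choose (m - 1) : Int) * ((k + m : Nat) : Int)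
            = ((k + m).choose m : Int) * (m : Int) := by
          have := Nat.add_one_mul_choose_eq (k + (m - 1)) (m - 1)
          have he : k + (m - 1) + 1 = k + m := by omega
          have he2 : (m - 1) + 1 = m := by omega
          rw [he, he2] at this
          -- this : (k+m) * choose (k+(m-1)) (m-1) = choose (k+m) m * m
          exact_mod_cast by
            calc (k + (m - 1)).choose (m - 1) * (k + m)
                = (k + m) * (k + (m - 1)).choose (m - 1) := by ring
              _ = (k + m).choose m * m := this
        have hmpos : (0:Int) < (m : Int) := by exact_mod_cast hm
        rw [PySem.Int.floordiv_eq_ediv_of_pos hmpos, hmul,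
          Int.mul_ediv_cancel _ (by omega)]
      rw [hstep]
      simp only [Prod.mk.injEq]
      refine ⟨?_, ?_⟩
      · rw [pvCst_snoc k 0 m]
        simp
      · have : m + 1 - 1 = m := by omega
        rw [this]

-- B's map over indices of dot products with suffixes equals pvBform
theorem pvMapRange (cs : List Int) (k : Nat) (xs : List Int)
    (h : ∀ ys : List Int, ys.length ≤ xs.length → pvDot cs ys = pvW k 0 ys) :
    (List.range xs.length).map (fun j => PySem.Int.mod (pvDot cs (xs.drop j)) 10)
      = pvBform k xs := by
  induction xs with
  | nil => rfl
  | cons x xs ih =>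
    rw [List.length_cons, List.range_succ_eq_map, List.map_cons, List.map_map]
    rw [pvBform, List.cons.injEq]
    refine ⟨?_, ?_⟩
    · rw [List.drop_zero, h (x :: xs) le_rfl]
    · have hcomp : ((fun j => PySem.Int.mod (pvDot cs ((x :: xs).drop j)) 10) ∘ Nat.succ)
          = (fun j => PySem.Int.mod (pvDot cs (xs.drop j)) 10) := by
        funext j
        simp [Function.comp, List.drop_succ_cons]
      rw [hcomp]
      exact ih (fun ys hy => h ys (by simp; omega))

theorem pvMap_slices (cs : List Int) (k : Nat) (xs : List Int)
    (h : ∀ ys : List Int, ys.length ≤ xs.length → pvDot cs ys = pvW k 0 ys) :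
    (PySem.List.pyRange 0 (xs.length : Int) 1).map
      (fun i => PySem.Int.mod (pvDot cs (PySem.List.slice xs (some i) none)) 10)
      = pvBform k xs := by
  rw [PySem.List.pyRange_one, List.map_map]
  have hlen : (((xs.length : Int) - 0)).toNat = xs.length := by omega
  rw [hlen]
  have hcomp : ((fun i => PySem.Int.mod (pvDot cs (PySem.List.slice xs (some i) none)) 10)
        ∘ fun (j : Nat) => (0 : Int) + (j : Int))
      = (fun j => PySem.Int.mod (pvDot cs (xs.drop j)) 10) := by
    funext j
    simp [Function.comp, PySem.List.slice_from_natCast]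
  rw [hcomp]
  exact pvMapRange cs k xs h

theorem FFT2_alt_eq_bform (signal : List Int) (phases : Int) (k : Nat)
    (hph : phases = (k : Int) + 1) :
    FFT2_alt signal phases = pvBform k signal := by
  have hneg : ¬ phases ≤ 0 := by omega
  cases signal with
  | nil =>
    simp only [FFT2_alt, if_neg hneg, List.length_nil]
    rw [PySem.List.pyRange_one_eq_nil (by norm_num)]
    rfl
  | cons x t =>
    simp only [FFT2_alt, if_neg hneg]
    rw [pvCsLoop k (x :: t).length phases hph (by simp)]
    exact pvMap_slices (pvCst k 0 (x :: t).length) k (x :: t)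
      (fun ys hy => pvDot_cst k 0 (x :: t).length ys hy)

-- ===== VERDICT (by name: the statement is the Claim_ definition above) =====
theorem FFT2_spec : Claim_equal_FFT2 := by
  intro signal phases _
  unfold Spec_FFT2
  by_cases hle : phases ≤ 0
  · -- A: empty range; B: early return
    have hA : FFT2 signal phases = signal := by
      unfold FFT2
      rw [PySem.List.pyRange_one_eq_nil (by omega)]
      rfl
    rw [hA]
    unfold FFT2_alt
    rw [if_pos hle]
  · have hpos : 1 ≤ phases := by omega
    obtain ⟨k, hk⟩ : ∃ k : Nat, phases = (k : Int) + 1 :=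
      ⟨(phases - 1).toNat, by omega⟩
    have hp : phases = ((k + 1 : Nat) : Int) := by push_cast; omega
    rw [hp, pvFFT2_iterate, ← hp, FFT2_alt_eq_bform signal phases k hk,
      pvIterate_bform]
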